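-- pv_equiv track=rewrite | github.com/8x15yz/Algorithm-Solutions | 2023/programers/04/프렌즈4블록.py | matchingBlock
-- ===== SOURCE A (Python) =====
-- deltas = [[(-1, 0), (-1, 1), (0, 1)], [(0, 1), (1, 1), (1, 0)], [(1, 0), (1, -1), (0, -1)], [(0, -1), (-1, -1), (-1, 0)]]
--
-- def matchingBlock(board, N, M, answer):
--     checkBox = []
--     for m in range(M):
--         for n in range(N):
--             for delta in deltas:
--                 checkBoxInner = []
--                 for dm, dn in delta:
--                     if 0 <= dm+m < M and 0 <= dn+n <N and board[dm+m][dn+n] == board[m][n]: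
--                         checkBoxInner.append((m, n))
--                         checkBoxInner.append((dm+m, dn+n))
--                     else: break
--                 else:
--                     checkBox += checkBoxInner
--     else:
--         for i, j in checkBox:
--             if board[i][j] != '0':
--                 board[i][j] = '0'
--                 answer += 1
--     return (board, answer)
-- ===== SOURCE B (Python) =====
-- def matchingBlock(board, N, M, answer):
--     marked = set()
--     for r in range(M - 1):
--         for c in range(N - 1):
--             quad = {board[r][c], board[r + 1][c], board[r][c + 1], board[r + 1][c + 1]}
--             if len(quad) == 1 and board[r][c] != '0':
--                 marked.update({(r, c), (r + 1, c), (r, c + 1), (r + 1, c + 1)})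
--     for i, j in marked:
--         board[i][j] = '0'
--         answer += 1
--     return (board, answer)
-- ===== Notes on version B (the rewrite author's own statement) =====
-- stated objective: simpler
-- what changed: B makes one scan over 2x2 top-left corners collecting the cells of monochrome non-'0' blocks into a set and then zeroes/counts each set element once, replacing A's per-cell four-orientation break/else scan with duplicate appends and its dedup-by-mutation counting pass.
import Mathlib
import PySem

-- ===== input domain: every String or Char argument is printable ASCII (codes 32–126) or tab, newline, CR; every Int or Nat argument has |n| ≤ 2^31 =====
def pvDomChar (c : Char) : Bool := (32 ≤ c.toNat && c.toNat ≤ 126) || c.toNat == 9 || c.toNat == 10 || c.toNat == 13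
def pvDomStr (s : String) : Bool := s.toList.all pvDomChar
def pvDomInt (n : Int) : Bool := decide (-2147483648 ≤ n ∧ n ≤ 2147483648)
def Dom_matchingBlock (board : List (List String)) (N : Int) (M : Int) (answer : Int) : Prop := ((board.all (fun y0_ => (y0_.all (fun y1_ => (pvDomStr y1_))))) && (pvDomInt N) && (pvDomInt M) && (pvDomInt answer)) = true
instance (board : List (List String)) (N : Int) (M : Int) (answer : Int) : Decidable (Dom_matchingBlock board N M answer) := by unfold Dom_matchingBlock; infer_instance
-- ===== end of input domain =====

-- B replaces A's per-cell four-orientation scan and dedup-by-mutation counting by one scan over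
-- 2x2 top-left corners into a set of marked cells (objective: simpler). Both Pythons mutate
-- `board` in place the same way; the equivalence proved here is about the return value.

-- ===== PORT A =====

-- board[i][j] as an Option (none = IndexError, excluded by Pre_); shared by both ports
def pvGetCell (board : List (List String)) (i : Int) (j : Int) : Option String :=
  match PySem.List.pyGet? board i with
  | some row => PySem.List.pyGet? row j
  | none => none

-- board[i][j] = '0'; exact for 0 ≤ i, 0 ≤ j (always the case at its call sites), in range under Pre_
def pvSetCell (board : List (List String)) (i : Int) (j : Int) : List (List String) :=
  board.modify i.toNat (fun row => row.set j.toNat "0")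

def pvDeltas : List (List (Int × Int)) :=
  [[(-1, 0), (-1, 1), (0, 1)], [(0, 1), (1, 1), (1, 0)],
   [(1, 0), (1, -1), (0, -1)], [(0, -1), (-1, -1), (-1, 0)]]

-- the inner 'for dm, dn in delta: if …: append else: break' loop; `some acc` = the for-else ran (no break)
def pvInnerA (board : List (List String)) (N : Int) (M : Int) (m : Int) (n : Int) :
    List (Int × Int) → List (Int × Int) → Option (List (Int × Int))
  | [], acc => some acc
  | (dm, dn) :: rest, acc =>
      if 0 ≤ dm + m ∧ dm + m < M ∧ 0 ≤ dn + n ∧ dn + n < N ∧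
          pvGetCell board (dm + m) (dn + n) = pvGetCell board m n then
        pvInnerA board N M m n rest (acc ++ [(m, n), (dm + m, dn + n)])
      else
        none

def pvCheckBox (board : List (List String)) (N : Int) (M : Int) : List (Int × Int) :=
  (PySem.List.pyRange 0 M 1).foldl (fun cb m =>
    (PySem.List.pyRange 0 N 1).foldl (fun cb n =>
      pvDeltas.foldl (fun cb delta =>
        match pvInnerA board N M m n delta [] with
        | some inner => cb ++ inner
        | none => cb) cb) cb) []

def matchingBlock (board : List (List String)) (N : Int) (M : Int) (answer : Int) : List (List String) × Int :=
  (pvCheckBox board N M).foldl (fun st ij =>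
    if pvGetCell st.1 ij.1 ij.2 ≠ some "0" then (pvSetCell st.1 ij.1 ij.2, st.2 + 1) else st)
    (board, answer)

-- ===== PORT B =====

def pvMarked (board : List (List String)) (N : Int) (M : Int) : PySem.Set (Int × Int) :=
  (PySem.List.pyRange 0 (M - 1) 1).foldl (fun s r =>
    (PySem.List.pyRange 0 (N - 1) 1).foldl (fun s c =>
      if (PySem.Set.ofList [pvGetCell board r c, pvGetCell board (r + 1) c,
            pvGetCell board r (c + 1), pvGetCell board (r + 1) (c + 1)]).length = 1 ∧
          pvGetCell board r c ≠ some "0" then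
        PySem.Set.update s [(r, c), (r + 1, c), (r, c + 1), (r + 1, c + 1)]
      else s) s) PySem.Set.empty

def matchingBlock_alt (board : List (List String)) (N : Int) (M : Int) (answer : Int) : List (List String) × Int :=
  (pvMarked board N M).foldl (fun st ij => (pvSetCell st.1 ij.1 ij.2, st.2 + 1)) (board, answer)

-- ===== PRECONDITION & SPEC =====

-- Exactly the inputs on which the Python A returns (otherwise it raises IndexError probing a
-- neighbour outside the actual board): either M, N too small for any probe, or the first M rows
-- are large enough for every probe.
def Pre_matchingBlock (board : List (List String)) (N : Int) (M : Int) (answer : Int) : Prop :=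
  (M ≤ 1 ∧ N ≤ 1) ∨ M ≤ 0 ∨ N ≤ 0 ∨
    (M ≤ (board.length : Int) ∧ ∀ row ∈ board.take M.toNat, N ≤ (row.length : Int))
instance (board : List (List String)) (N : Int) (M : Int) (answer : Int) : Decidable (Pre_matchingBlock board N M answer) := by unfold Pre_matchingBlock; infer_instance

def pvWitness_matchingBlock : List (List String) × Int × Int × Int :=
  ([["a", "a"], ["a", "a"]], 2, 2, 0)

def Spec_matchingBlock (board : List (List String)) (N : Int) (M : Int) (answer : Int) (out : List (List String) × Int) : Prop := out = matchingBlock_alt board N M answer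
instance (board : List (List String)) (N : Int) (M : Int) (answer : Int) (out : List (List String) × Int) : Decidable (Spec_matchingBlock board N M answer out) := by unfold Spec_matchingBlock; infer_instance

-- ===== CLAIM (what is proved, stated in full; the proofs are below) =====
def Claim_equal_matchingBlock : Prop := ∀ (board : List (List String)) (N : Int) (M : Int) (answer : Int), Dom_matchingBlock board N M answer → Pre_matchingBlock board N M answer → Spec_matchingBlock board N M answer (matchingBlock board N M answer)

-- ===== LEMMAS AND PROOFS =====

lemma pvInnerA_getD (board : List (List String)) (N M m n d1 e1 d2 e2 d3 e3 : Int) :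
    (pvInnerA board N M m n [(d1, e1), (d2, e2), (d3, e3)] []).getD [] =
      if (0 ≤ d1 + m ∧ d1 + m < M ∧ 0 ≤ e1 + n ∧ e1 + n < N ∧
            pvGetCell board (d1 + m) (e1 + n) = pvGetCell board m n) ∧
          (0 ≤ d2 + m ∧ d2 + m < M ∧ 0 ≤ e2 + n ∧ e2 + n < N ∧
            pvGetCell board (d2 + m) (e2 + n) = pvGetCell board m n) ∧
          (0 ≤ d3 + m ∧ d3 + m < M ∧ 0 ≤ e3 + n ∧ e3 + n < N ∧
            pvGetCell board (d3 + m) (e3 + n) = pvGetCell board m n) then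
        [(m, n), (d1 + m, e1 + n), (m, n), (d2 + m, e2 + n), (m, n), (d3 + m, e3 + n)]
      else [] := by
  simp only [pvInnerA]
  split_ifs <;> simp_all

lemma pvCheckBox_eq (board : List (List String)) (N M : Int) :
    pvCheckBox board N M =
      (PySem.List.pyRange 0 M 1).flatMap (fun m =>
        (PySem.List.pyRange 0 N 1).flatMap (fun n =>
          pvDeltas.flatMap (fun delta => (pvInnerA board N M m n delta []).getD []))) := by
  unfold pvCheckBox
  have h1 : ∀ (m n : Int) (cb : List (Int × Int)),
      pvDeltas.foldl (fun cb delta =>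
        match pvInnerA board N M m n delta [] with
        | some inner => cb ++ inner
        | none => cb) cb
        = cb ++ pvDeltas.flatMap (fun delta => (pvInnerA board N M m n delta []).getD []) := by
    intro m n cb
    rw [← PySem.List.foldl_append_eq_flatMap]
    apply PySem.List.foldl_congr_mem
    intro acc d _
    cases pvInnerA board N M m n d [] <;> simp
  have h2 : ∀ (m : Int) (cb : List (Int × Int)),
      (PySem.List.pyRange 0 N 1).foldl (fun cb n =>
        pvDeltas.foldl (fun cb delta =>
          match pvInnerA board N M m n delta [] with
          | some inner => cb ++ inner
          | none => cb) cb) cb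
        = cb ++ (PySem.List.pyRange 0 N 1).flatMap (fun n =>
            pvDeltas.flatMap (fun delta => (pvInnerA board N M m n delta []).getD [])) := by
    intro m cb
    rw [← PySem.List.foldl_append_eq_flatMap]
    apply PySem.List.foldl_congr_mem
    intro acc x _
    exact h1 m x acc
  conv_rhs => rw [← List.nil_append (List.flatMap _ _)]
  rw [← PySem.List.foldl_append_eq_flatMap]
  apply PySem.List.foldl_congr_mem
  intro acc x _
  exact h2 x acc

def pvBlk (board : List (List String)) (N : Int) (M : Int) (r : Int) (c : Int) : Prop :=
  0 ≤ r ∧ r + 1 < M ∧ 0 ≤ c ∧ c + 1 < N ∧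
  pvGetCell board (r + 1) c = pvGetCell board r c ∧
  pvGetCell board r (c + 1) = pvGetCell board r c ∧
  pvGetCell board (r + 1) (c + 1) = pvGetCell board r c

def pvCorner (r : Int) (c : Int) (i : Int) (j : Int) : Prop :=
  (i, j) ∈ ([(r, c), (r + 1, c), (r, c + 1), (r + 1, c + 1)] : List (Int × Int))

def pvInBlk (board : List (List String)) (N : Int) (M : Int) (i : Int) (j : Int) : Prop :=
  ∃ r c, pvBlk board N M r c ∧ pvCorner r c i j

lemma pvN1 (x : Int) : -1 + x = x - 1 := by omega
lemma pv1 (x : Int) : 1 + x = x + 1 := by omega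

lemma pv_mem_checkBox (board : List (List String)) (N M i j : Int) :
    (i, j) ∈ pvCheckBox board N M ↔ pvInBlk board N M i j := by
  rw [pvCheckBox_eq]
  simp only [pvDeltas, List.flatMap_cons, List.flatMap_nil, List.append_nil, pvInnerA_getD,
    List.mem_flatMap, PySem.List.mem_pyRange_one, List.mem_append, List.mem_ite_nil_right,
    List.mem_cons, List.not_mem_nil, or_false, Prod.mk.injEq, pvN1, pv1, zero_add]
  constructor
  · rintro ⟨m, ⟨hm0, hmM⟩, n, ⟨hn0, hnN⟩,
      (⟨⟨C1, C2, C3⟩, hmem⟩ | ⟨⟨C1, C2, C3⟩, hmem⟩ | ⟨⟨C1, C2, C3⟩, hmem⟩ | ⟨⟨C1, C2, C3⟩, hmem⟩)⟩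
    · -- orientation 0: block top-left (m-1, n)
      obtain ⟨a1, a2, a3, a4, h1⟩ := C1
      obtain ⟨b1, b2, b3, b4, h2⟩ := C2
      obtain ⟨d1, d2, d3, d4, h3⟩ := C3
      refine ⟨m - 1, n, ⟨by omega, by omega, by omega, by omega, ?_, ?_, ?_⟩, ?_⟩
      · rw [show m - 1 + 1 = m from by omega]; exact h1.symm
      · exact h2.trans h1.symm
      · rw [show m - 1 + 1 = m from by omega]; exact h3.trans h1.symm
      · simp only [pvCorner, List.mem_cons, List.not_mem_nil, or_false, Prod.mk.injEq]; omega
    · -- orientation 1: block top-left (m, n)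
      obtain ⟨a1, a2, a3, a4, h1⟩ := C1
      obtain ⟨b1, b2, b3, b4, h2⟩ := C2
      obtain ⟨d1, d2, d3, d4, h3⟩ := C3
      refine ⟨m, n, ⟨by omega, by omega, by omega, by omega, h3, h1, h2⟩, ?_⟩
      simp only [pvCorner, List.mem_cons, List.not_mem_nil, or_false, Prod.mk.injEq]; omega
    · -- orientation 2: block top-left (m, n-1)
      obtain ⟨a1, a2, a3, a4, h1⟩ := C1
      obtain ⟨b1, b2, b3, b4, h2⟩ := C2
      obtain ⟨d1, d2, d3, d4, h3⟩ := C3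
      refine ⟨m, n - 1, ⟨by omega, by omega, by omega, by omega, ?_, ?_, ?_⟩, ?_⟩
      · exact h2.trans h3.symm
      · rw [show n - 1 + 1 = n from by omega]; exact h3.symm
      · rw [show n - 1 + 1 = n from by omega]; exact h1.trans h3.symm
      · simp only [pvCorner, List.mem_cons, List.not_mem_nil, or_false, Prod.mk.injEq]; omega
    · -- orientation 3: block top-left (m-1, n-1)
      obtain ⟨a1, a2, a3, a4, h1⟩ := C1
      obtain ⟨b1, b2, b3, b4, h2⟩ := C2
      obtain ⟨d1, d2, d3, d4, h3⟩ := C3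
      refine ⟨m - 1, n - 1, ⟨by omega, by omega, by omega, by omega, ?_, ?_, ?_⟩, ?_⟩
      · rw [show m - 1 + 1 = m from by omega]; exact h1.trans h2.symm
      · rw [show n - 1 + 1 = n from by omega]; exact h3.trans h2.symm
      · rw [show m - 1 + 1 = m from by omega, show n - 1 + 1 = n from by omega]; exact h2.symm
      · simp only [pvCorner, List.mem_cons, List.not_mem_nil, or_false, Prod.mk.injEq]; omega
  · rintro ⟨r, c, ⟨hr0, hrM, hc0, hcN, e1, e2, e3⟩, hcorner⟩
    simp only [pvCorner, List.mem_cons, List.not_mem_nil, or_false, Prod.mk.injEq] at hcorner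
    refine ⟨r, ⟨by omega, by omega⟩, c, ⟨by omega, by omega⟩, Or.inr (Or.inl ⟨⟨⟨by omega, by omega, by omega, by omega, e2⟩, ⟨by omega, by omega, by omega, by omega, e3⟩, by omega, by omega, by omega, by omega, e1⟩, by omega⟩)⟩

-- len({a,b,c,d}) == 1 means all four are equal
lemma pv_quad_len (a b c d : Option String) :
    (PySem.Set.ofList [a, b, c, d]).length = 1 ↔ b = a ∧ c = a ∧ d = a := by
  constructor
  · intro h
    obtain ⟨x, hx⟩ := List.length_eq_one_iff.mp h
    have ha : a ∈ PySem.Set.ofList [a, b, c, d] := by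
      rw [PySem.Set.mem_ofList]; simp
    have hb : b ∈ PySem.Set.ofList [a, b, c, d] := by
      rw [PySem.Set.mem_ofList]; simp
    have hc : c ∈ PySem.Set.ofList [a, b, c, d] := by
      rw [PySem.Set.mem_ofList]; simp
    have hd : d ∈ PySem.Set.ofList [a, b, c, d] := by
      rw [PySem.Set.mem_ofList]; simp
    rw [hx] at ha hb hc hd
    simp only [List.mem_singleton] at ha hb hc hd
    exact ⟨hb.trans ha.symm, hc.trans ha.symm, hd.trans ha.symm⟩
  · rintro ⟨hb, hc, hd⟩
    subst hb; subst hc; subst hd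
    simp [PySem.Set.ofList, PySem.Set.add]

lemma pv_mem_foldl_step (step : PySem.Set (Int × Int) → Int → PySem.Set (Int × Int))
    (Q : Int → (Int × Int) → Prop)
    (h : ∀ s r y, y ∈ step s r ↔ y ∈ s ∨ Q r y) (l : List Int) (s : PySem.Set (Int × Int))
    (y : Int × Int) :
    y ∈ l.foldl step s ↔ y ∈ s ∨ ∃ r ∈ l, Q r y := by
  induction l generalizing s with
  | nil => simp
  | cons r rest ih =>
    rw [List.foldl_cons, ih, h]
    simp only [List.mem_cons]
    constructor
    · rintro ((hy | hq) | ⟨x, hx, hq⟩)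
      · exact Or.inl hy
      · exact Or.inr ⟨r, Or.inl rfl, hq⟩
      · exact Or.inr ⟨x, Or.inr hx, hq⟩
    · rintro (hy | ⟨x, (rfl | hx), hq⟩)
      · exact Or.inl (Or.inl hy)
      · exact Or.inl (Or.inr hq)
      · exact Or.inr ⟨x, hx, hq⟩

lemma pv_mem_marked (board : List (List String)) (N M : Int) (i j : Int) :
    (i, j) ∈ pvMarked board N M ↔
      ∃ r c, pvBlk board N M r c ∧ pvGetCell board r c ≠ some "0" ∧ pvCorner r c i j := by
  unfold pvMarked
  rw [pv_mem_foldl_step _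
    (fun r y => ∃ c, (0 ≤ c ∧ c < N - 1) ∧
      ((pvGetCell board (r + 1) c = pvGetCell board r c ∧
        pvGetCell board r (c + 1) = pvGetCell board r c ∧
        pvGetCell board (r + 1) (c + 1) = pvGetCell board r c) ∧
        pvGetCell board r c ≠ some "0" ∧
        y ∈ ([(r, c), (r + 1, c), (r, c + 1), (r + 1, c + 1)] : List (Int × Int)))) ?_]
  · simp only [PySem.Set.empty, List.not_mem_nil, false_or, PySem.List.mem_pyRange_one]
    constructor
    · rintro ⟨r, ⟨hr0, hr1⟩, c, ⟨hc0, hc1⟩, ⟨heq, h0, hmem⟩⟩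
      exact ⟨r, c, ⟨hr0, by omega, hc0, by omega, heq.1, heq.2.1, heq.2.2⟩, h0, hmem⟩
    · rintro ⟨r, c, ⟨hr0, hr1, hc0, hc1, e1, e2, e3⟩, h0, hmem⟩
      exact ⟨r, ⟨hr0, by omega⟩, c, ⟨hc0, by omega⟩, ⟨e1, e2, e3⟩, h0, hmem⟩
  · intro s r y
    rw [pv_mem_foldl_step _
      (fun c y => (pvGetCell board (r + 1) c = pvGetCell board r c ∧
        pvGetCell board r (c + 1) = pvGetCell board r c ∧
        pvGetCell board (r + 1) (c + 1) = pvGetCell board r c) ∧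
        pvGetCell board r c ≠ some "0" ∧
        y ∈ ([(r, c), (r + 1, c), (r, c + 1), (r + 1, c + 1)] : List (Int × Int))) ?_]
    · simp only [PySem.List.mem_pyRange_one]
    · intro s c y
      split_ifs with hcond
      · rw [PySem.Set.mem_update, pv_quad_len] at *
        constructor
        · rintro (hy | hmem)
          · exact Or.inl hy
          · exact Or.inr ⟨hcond.1, hcond.2, hmem⟩
        · rintro (hy | ⟨heq, h0, hmem⟩)
          · exact Or.inl hy
          · exact Or.inr hmem
      · rw [pv_quad_len] at hcond
        constructor
        · intro hy; exact Or.inl hy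
        · rintro (hy | ⟨heq, h0, hmem⟩)
          · exact hy
          · exact absurd ⟨heq, h0⟩ hcond

lemma pv_nodup_foldl_step (step : PySem.Set (Int × Int) → Int → PySem.Set (Int × Int))
    (h : ∀ s r, s.Nodup → (step s r).Nodup) (l : List Int) (s : PySem.Set (Int × Int))
    (hs : s.Nodup) : (l.foldl step s).Nodup := by
  induction l generalizing s with
  | nil => exact hs
  | cons r rest ih => exact ih _ (h s r hs)

lemma pv_nodup_marked (board : List (List String)) (N M : Int) :
    (pvMarked board N M).Nodup := by
  unfold pvMarked
  apply pv_nodup_foldl_step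
  · intro s r hs
    apply pv_nodup_foldl_step
    · intro s c hs
      split_ifs
      · exact PySem.Set.nodup_update _ _ hs
      · exact hs
    · exact hs
  · exact List.nodup_nil

lemma pv_corner_val (board : List (List String)) {N M r c i j : Int}
    (hb : pvBlk board N M r c) (hc : pvCorner r c i j) :
    pvGetCell board i j = pvGetCell board r c := by
  obtain ⟨_, _, _, _, e1, e2, e3⟩ := hb
  simp only [pvCorner, List.mem_cons, List.not_mem_nil, or_false, Prod.mk.injEq] at hc
  rcases hc with ⟨rfl, rfl⟩ | ⟨rfl, rfl⟩ | ⟨rfl, rfl⟩ | ⟨rfl, rfl⟩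
  · rfl
  · exact e1
  · exact e2
  · exact e3

lemma pv_corner_bounds {N M r c i j : Int} (hb : 0 ≤ r ∧ r + 1 < M ∧ 0 ≤ c ∧ c + 1 < N)
    (hc : pvCorner r c i j) : 0 ≤ i ∧ i < M ∧ 0 ≤ j ∧ j < N := by
  simp only [pvCorner, List.mem_cons, List.not_mem_nil, or_false, Prod.mk.injEq] at hc
  omega

def pvZero (board : List (List String)) (F : Finset (Int × Int)) : List (List String) :=
  board.mapIdx (fun i row => row.mapIdx (fun j v => if ((i : Int), (j : Int)) ∈ F then "0" else v))

lemma pvZero_empty (board : List (List String)) : pvZero board ∅ = board := by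
  unfold pvZero
  apply List.ext_getElem
  · simp
  · intro k h1 h2
    simp only [List.getElem_mapIdx, Finset.notMem_empty, if_false]
    apply List.ext_getElem <;> simp [List.getElem_mapIdx]

lemma pvSetCell_zero (board : List (List String)) (F : Finset (Int × Int)) {i j : Int}
    (hi : 0 ≤ i) (hj : 0 ≤ j) :
    pvSetCell (pvZero board F) i j = pvZero board (insert (i, j) F) := by
  have hi' : ((i.toNat : Int)) = i := Int.toNat_of_nonneg hi
  have hj' : ((j.toNat : Int)) = j := Int.toNat_of_nonneg hj
  unfold pvSetCell pvZero
  apply List.ext_getElem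
  · simp [List.length_modify]
  · intro k h1 h2
    rw [List.getElem_modify]
    by_cases hk : i.toNat = k
    · rw [if_pos hk]
      apply List.ext_getElem
      · simp
      · intro l h3 h4
        rw [List.getElem_set]
        simp only [List.getElem_mapIdx]
        by_cases hl : j.toNat = l
        · rw [if_pos hl]
          rw [if_pos]
          rw [Finset.mem_insert]
          left
          rw [← hk, ← hl, hi', hj']
        · rw [if_neg hl]
          congr 1
          rw [eq_iff_iff, Finset.mem_insert]
          constructor
          · exact Or.inr
          · exact fun h => h.elim (fun h => absurd (congrArg Prod.snd h) (by simp; omega)) id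
    · rw [if_neg hk]
      simp only [List.getElem_mapIdx]
      apply List.ext_getElem
      · simp
      · intro l h3 h4
        simp only [List.getElem_mapIdx]
        congr 1
        rw [eq_iff_iff, Finset.mem_insert]
        constructor
        · exact Or.inr
        · exact fun h => h.elim (fun h => absurd (congrArg Prod.fst h) (by simp; omega)) id

lemma pvGetCell_zero (board : List (List String)) (F : Finset (Int × Int)) {i j : Int}
    (hi : 0 ≤ i) (hj : 0 ≤ j)
    (hF : ∀ p ∈ F, (pvGetCell board p.1 p.2).isSome) :
    pvGetCell (pvZero board F) i j =
      if (i, j) ∈ F then some "0" else pvGetCell board i j := by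
  have hmem : (i, j) ∈ F → (pvGetCell board i j).isSome := fun h => hF _ h
  rw [← Int.toNat_of_nonneg hi, ← Int.toNat_of_nonneg hj] at hmem ⊢
  unfold pvGetCell at hmem ⊢
  unfold pvZero
  rw [PySem.List.pyGet?_natCast] at hmem ⊢
  rw [List.getElem?_mapIdx]
  cases hrow : board[i.toNat]? with
  | none =>
    simp only [hrow, Option.map_none] at hmem ⊢
    rw [if_neg (fun h => by simpa using hmem h)]
    rw [PySem.List.pyGet?_natCast, hrow]
  | some row =>
    simp only [hrow, Option.map_some] at hmem ⊢
    rw [PySem.List.pyGet?_natCast] at hmem ⊢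
    rw [List.getElem?_mapIdx]
    cases hcell : row[j.toNat]? with
    | none =>
      simp only [hcell, Option.map_none] at hmem ⊢
      rw [if_neg (fun h => by simpa using hmem h)]
      rw [PySem.List.pyGet?_natCast, hrow]
      simp only []
      rw [PySem.List.pyGet?_natCast, hcell]
    | some v =>
      simp only [Option.map_some]
      rw [PySem.List.pyGet?_natCast, hrow]
      simp only []
      rw [PySem.List.pyGet?_natCast, hcell]
      by_cases h : ((i.toNat : Int), (j.toNat : Int)) ∈ F
      · rw [if_pos h, if_pos h]
      · rw [if_neg h, if_neg h]

lemma pv_markB (board : List (List String)) (L : List (Int × Int)) (F : Finset (Int × Int)) (a : Int)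
    (hL : ∀ p ∈ L, 0 ≤ p.1 ∧ 0 ≤ p.2) (hnd : L.Nodup) (hdisj : ∀ p ∈ L, p ∉ F) :
    L.foldl (fun st ij => (pvSetCell st.1 ij.1 ij.2, st.2 + 1)) (pvZero board F, a) =
      (pvZero board (F ∪ L.toFinset), a + (L.length : Int)) := by
  induction L generalizing F a with
  | nil => simp
  | cons p rest ih =>
    obtain ⟨i, j⟩ := p
    rw [List.foldl_cons]
    have hij := hL (i, j) (List.mem_cons_self)
    simp only at hij ⊢
    rw [pvSetCell_zero board F hij.1 hij.2]
    rw [ih (insert (i, j) F) (a + 1) (fun q hq => hL q (List.mem_cons_of_mem _ hq))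
      (List.Nodup.of_cons hnd)
      (fun q hq => by
        rw [Finset.mem_insert]
        rintro (rfl | hqF)
        · exact (List.nodup_cons.mp hnd).1 hq
        · exact hdisj q (List.mem_cons_of_mem _ hq) hqF)]
    rw [Finset.insert_union, ← Finset.union_insert, ← List.toFinset_cons]
    simp only [List.length_cons]
    rw [Prod.mk.injEq]
    refine ⟨rfl, by push_cast; ring⟩

lemma pv_markA (board : List (List String)) (C : List (Int × Int)) (F : Finset (Int × Int)) (a : Int)
    (hC : ∀ p ∈ C, 0 ≤ p.1 ∧ 0 ≤ p.2 ∧ (pvGetCell board p.1 p.2).isSome)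
    (hF : ∀ p ∈ F, 0 ≤ p.1 ∧ 0 ≤ p.2 ∧ (pvGetCell board p.1 p.2).isSome ∧
        pvGetCell board p.1 p.2 ≠ some "0") :
    C.foldl (fun st ij =>
        if pvGetCell st.1 ij.1 ij.2 ≠ some "0" then (pvSetCell st.1 ij.1 ij.2, st.2 + 1) else st)
      (pvZero board F, a) =
      (pvZero board (F ∪ (C.filter (fun p => pvGetCell board p.1 p.2 ≠ some "0")).toFinset),
        a + ((F ∪ (C.filter (fun p => pvGetCell board p.1 p.2 ≠ some "0")).toFinset).card : Int)
          - (F.card : Int)) := by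
  induction C generalizing F a with
  | nil =>
    simp only [List.foldl_nil, List.filter_nil, List.toFinset_nil, Finset.union_empty,
      Prod.mk.injEq]
    exact ⟨trivial, by ring⟩
  | cons p rest ih =>
    obtain ⟨i, j⟩ := p
    have hij := hC (i, j) (List.mem_cons_self)
    simp only at hij
    obtain ⟨hi0, hj0, hsome⟩ := hij
    rw [List.foldl_cons]
    have hget : pvGetCell (pvZero board F) i j =
        if (i, j) ∈ F then some "0" else pvGetCell board i j :=
      pvGetCell_zero board F hi0 hj0 (fun q hq => (hF q hq).2.2.1)
    by_cases hmemF : (i, j) ∈ F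
    · -- already zeroed: skipped
      have hne : pvGetCell board i j ≠ some "0" := (hF _ hmemF).2.2.2
      rw [if_neg (by simp [hget, hmemF])]
      rw [ih F a (fun q hq => hC q (List.mem_cons_of_mem _ hq)) hF]
      have : ((i, j) :: rest).filter (fun p => pvGetCell board p.1 p.2 ≠ some "0") =
          (i, j) :: rest.filter (fun p => pvGetCell board p.1 p.2 ≠ some "0") := by
        simp [hne]
      rw [this, List.toFinset_cons, Finset.union_insert, Finset.insert_eq_self.mpr
        (Finset.mem_union_left _ hmemF)]
    · by_cases h0 : pvGetCell board i j = some "0"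
      · -- cell is '0': skipped and filtered out
        rw [if_neg (by simp [hget, hmemF, h0])]
        rw [ih F a (fun q hq => hC q (List.mem_cons_of_mem _ hq)) hF]
        have : ((i, j) :: rest).filter (fun p => pvGetCell board p.1 p.2 ≠ some "0") =
            rest.filter (fun p => pvGetCell board p.1 p.2 ≠ some "0") := by
          simp [h0]
        rw [this]
      · -- marked now
        rw [if_pos (by simp [hget, hmemF, h0])]
        simp only
        rw [pvSetCell_zero board F hi0 hj0]
        rw [ih (insert (i, j) F) (a + 1) (fun q hq => hC q (List.mem_cons_of_mem _ hq))
          (fun q hq => by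
            rw [Finset.mem_insert] at hq
            rcases hq with rfl | hq
            · exact ⟨hi0, hj0, hsome, h0⟩
            · exact hF q hq)]
        have hfc : ((i, j) :: rest).filter (fun p => pvGetCell board p.1 p.2 ≠ some "0") =
            (i, j) :: rest.filter (fun p => pvGetCell board p.1 p.2 ≠ some "0") := by
          simp [h0]
        rw [hfc, List.toFinset_cons, Finset.insert_union, ← Finset.union_insert]
        rw [Prod.mk.injEq]
        refine ⟨rfl, ?_⟩
        rw [Finset.card_insert_of_notMem hmemF]
        push_cast
        ring

lemma pv_isSome (board : List (List String)) {N M i j : Int}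
    (hlen : M ≤ (board.length : Int)) (hrows : ∀ row ∈ board.take M.toNat, N ≤ (row.length : Int))
    (hi : 0 ≤ i) (hiM : i < M) (hj : 0 ≤ j) (hjN : j < N) :
    (pvGetCell board i j).isSome := by
  have hilen : i.toNat < board.length := by omega
  have hrow : board[i.toNat] ∈ board.take M.toNat := by
    have h1 : i.toNat < M.toNat := by omega
    have h2 : i.toNat < (board.take M.toNat).length := by
      rw [List.length_take]; omega
    have h3 : (board.take M.toNat)[i.toNat] = board[i.toNat] := List.getElem_take
    rw [← h3]
    exact List.getElem_mem h2
  have hN := hrows _ hrow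
  have hjlen : j.toNat < (board[i.toNat]).length := by omega
  unfold pvGetCell
  rw [PySem.List.pyGet?_eq_some_getElem board hi (by omega)]
  simp only []
  rw [PySem.List.pyGet?_eq_some_getElem board[i.toNat] hj (by omega)]
  simp

lemma pv_main (board : List (List String)) (N M answer : Int)
    (hpre : Pre_matchingBlock board N M answer) :
    matchingBlock board N M answer = matchingBlock_alt board N M answer := by
  have hCin : ∀ p ∈ pvCheckBox board N M, 0 ≤ p.1 ∧ 0 ≤ p.2 ∧
      (pvGetCell board p.1 p.2).isSome := by
    rintro ⟨i, j⟩ hp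
    rw [pv_mem_checkBox] at hp
    obtain ⟨r, c, hblk, hcor⟩ := hp
    obtain ⟨h1, h2, h3, h4, _, _, _⟩ := hblk
    have hb := pv_corner_bounds ⟨h1, h2, h3, h4⟩ hcor
    rcases hpre with ⟨hM, hN⟩ | hM | hN | ⟨hlen, hrows⟩
    · omega
    · omega
    · omega
    · exact ⟨hb.1, hb.2.2.1, pv_isSome board hlen hrows hb.1 hb.2.1 hb.2.2.1 hb.2.2.2⟩
  have hLin : ∀ p ∈ pvMarked board N M, 0 ≤ p.1 ∧ 0 ≤ p.2 := by
    rintro ⟨i, j⟩ hp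
    rw [pv_mem_marked] at hp
    obtain ⟨r, c, hblk, _, hcor⟩ := hp
    have hb := pv_corner_bounds ⟨hblk.1, hblk.2.1, hblk.2.2.1, hblk.2.2.2.1⟩ hcor
    exact ⟨hb.1, hb.2.2.1⟩
  have hnd := pv_nodup_marked board N M
  have hGL : (List.filter (fun p => pvGetCell board p.1 p.2 ≠ some "0")
      (pvCheckBox board N M)).toFinset = (pvMarked board N M).toFinset := by
    apply Finset.ext
    rintro ⟨i, j⟩
    rw [List.mem_toFinset, List.mem_toFinset, List.mem_filter]
    simp only [decide_not, Bool.not_eq_eq_eq_not, Bool.not_true, decide_eq_false_iff_not]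
    rw [pv_mem_checkBox, pv_mem_marked]
    constructor
    · rintro ⟨⟨r, c, hblk, hcor⟩, h0⟩
      refine ⟨r, c, hblk, ?_, hcor⟩
      rw [← pv_corner_val board hblk hcor]
      exact h0
    · rintro ⟨r, c, hblk, h0, hcor⟩
      refine ⟨⟨r, c, hblk, hcor⟩, ?_⟩
      rw [pv_corner_val board hblk hcor]
      exact h0
  have hA := pv_markA board (pvCheckBox board N M) ∅ answer hCin (by simp)
  have hB := pv_markB board (pvMarked board N M) ∅ answer hLin hnd (by simp)
  rw [pvZero_empty] at hA hB
  unfold matchingBlock matchingBlock_alt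
  rw [hA, hB]
  simp only [Finset.empty_union, Finset.card_empty]
  rw [hGL, List.toFinset_card_of_nodup hnd]
  rw [Prod.mk.injEq]
  exact ⟨rfl, by push_cast; ring⟩

-- ===== VERDICT (by name: the statement is the Claim_ definition above) =====
theorem matchingBlock_spec : Claim_equal_matchingBlock := by
  intro board N M answer _ hpre
  exact pv_main board N M answer hpre
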